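-- pv_equiv track=rewrite | github.com/ahsas257-glitc/Wash-pro | pages/Tool_6.py | enforce_single_cover
-- ===== SOURCE A (Python) =====
-- from typing import Optional, Dict, Tuple, List
--
-- def enforce_single_cover(selections: Dict[str, str]) -> Dict[str, str]:
--     covers = [u for u, p in selections.items() if p == "Cover Page"]
--     if len(covers) <= 1:
--         return selections
--     keep = covers[-1]
--     for u in covers[:-1]:
--         selections[u] = "Not selected"
--     return selections
-- ===== SOURCE B (Python) =====
-- def enforce_single_cover(selections):
--     last = None
--     for u, p in selections.items():
--         if p == "Cover Page":
--             if last is not None: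
--                 selections[last] = "Not selected"
--             last = u
--     return selections
-- ===== Notes on version B (the rewrite author's own statement) =====
-- stated objective: simpler
-- what changed: Replaces A's two-phase algorithm (build the list of cover keys, guard on its length, slice off the last and loop over the rest) with one streaming pass that keeps only the most recent cover key and demotes the previous one as each new cover is found.
import Mathlib
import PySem

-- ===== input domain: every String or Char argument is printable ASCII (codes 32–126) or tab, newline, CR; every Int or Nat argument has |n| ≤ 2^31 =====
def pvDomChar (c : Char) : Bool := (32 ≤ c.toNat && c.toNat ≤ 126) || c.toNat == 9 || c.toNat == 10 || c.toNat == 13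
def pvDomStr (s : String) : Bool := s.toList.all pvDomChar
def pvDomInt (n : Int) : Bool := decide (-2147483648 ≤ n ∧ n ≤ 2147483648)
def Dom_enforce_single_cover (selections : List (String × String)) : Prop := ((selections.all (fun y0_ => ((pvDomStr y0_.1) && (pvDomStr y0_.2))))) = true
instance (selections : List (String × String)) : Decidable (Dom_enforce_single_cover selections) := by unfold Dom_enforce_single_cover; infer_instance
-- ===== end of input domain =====

-- B replaces A's two-phase algorithm (collect cover keys, then demote all but the last)
-- with one streaming pass keeping only the most recent cover key.  Both Pythons mutate
-- the dict in place; the equivalence proved here is about the returned value.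

-- Python `selections[u] = v` on the association list: overwrite the first matching key
-- in place (new keys would append) — shared dict-assignment primitive for both ports.
def dictSet (d : List (String × String)) (k v : String) : List (String × String) :=
  match d with
  | [] => [(k, v)]
  | (k', v') :: rest => if k' == k then (k, v) :: rest else (k', v') :: dictSet rest k v

-- ===== PORT A =====
def enforce_single_cover (selections : List (String × String)) : List (String × String) :=
  let covers := (selections.filter (fun up => up.2 == "Cover Page")).map (·.1)
  if covers.length ≤ 1 then selections
  else
    let _keep := PySem.List.pyGet? covers (-1)
    (PySem.List.slice covers none (some (-1))).foldl
      (fun d u => dictSet d u "Not selected") selections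

-- ===== PORT B =====
-- the `for u, p in selections.items()` loop of Source B with state (d, last)
def altGo (d : List (String × String)) (last : Option String) :
    List (String × String) → List (String × String)
  | [] => d
  | (u, p) :: rest =>
    if p == "Cover Page" then
      match last with
      | some l => altGo (dictSet d l "Not selected") (some u) rest
      | none => altGo d (some u) rest
    else altGo d last rest

def enforce_single_cover_alt (selections : List (String × String)) : List (String × String) :=
  altGo selections none selections

-- ===== PRECONDITION & SPEC =====
def Spec_enforce_single_cover (selections : List (String × String)) (out : List (String × String)) : Prop := out = enforce_single_cover_alt selections
instance (selections : List (String × String)) (out : List (String × String)) : Decidable (Spec_enforce_single_cover selections out) := by unfold Spec_enforce_single_cover; infer_instance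

-- ===== CLAIM (what is proved, stated in full; the proofs are below) =====
def Claim_equal_enforce_single_cover : Prop := ∀ (selections : List (String × String)), Dom_enforce_single_cover selections → Spec_enforce_single_cover selections (enforce_single_cover selections)

-- ===== LEMMAS AND PROOFS =====

def coversOf (xs : List (String × String)) : List String :=
  (xs.filter (fun up => up.2 == "Cover Page")).map (·.1)

def ins (d : List (String × String)) (u : String) : List (String × String) :=
  dictSet d u "Not selected"

lemma coversOf_cons (u p : String) (xs : List (String × String)) :
    coversOf ((u, p) :: xs) =
      if p == "Cover Page" then u :: coversOf xs else coversOf xs := by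
  simp only [coversOf, List.filter_cons]
  split <;> simp_all

lemma altGo_some (xs : List (String × String)) :
    ∀ (d : List (String × String)) (l : String),
      altGo d (some l) xs = (l :: coversOf xs).dropLast.foldl ins d := by
  induction xs with
  | nil => intro d l; simp [altGo, coversOf]
  | cons hd tl ih =>
    intro d l
    obtain ⟨u, p⟩ := hd
    rw [coversOf_cons]
    by_cases hp : p == "Cover Page"
    · simp only [altGo, hp, if_pos, ih]
      rw [List.dropLast_cons₂, List.foldl_cons]
      rfl
    · simp [altGo, hp, ih]

lemma altGo_none (xs : List (String × String)) :
    ∀ (d : List (String × String)),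
      altGo d none xs = (coversOf xs).dropLast.foldl ins d := by
  induction xs with
  | nil => intro d; simp [altGo, coversOf]
  | cons hd tl ih =>
    intro d
    obtain ⟨u, p⟩ := hd
    rw [coversOf_cons]
    by_cases hp : p == "Cover Page"
    · simp only [altGo, hp, if_pos, altGo_some]
    · simp [altGo, hp, ih]

lemma alt_eq_foldl (selections : List (String × String)) :
    enforce_single_cover_alt selections =
      (coversOf selections).dropLast.foldl ins selections := by
  unfold enforce_single_cover_alt
  exact altGo_none selections selections

-- ===== VERDICT (by name: the statement is the Claim_ definition above) =====
theorem enforce_single_cover_spec : Claim_equal_enforce_single_cover := by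
  unfold Claim_equal_enforce_single_cover
  intro selections _
  unfold Spec_enforce_single_cover
  rw [alt_eq_foldl]
  unfold enforce_single_cover
  simp only []
  set covers := (selections.filter (fun up => up.2 == "Cover Page")).map (·.1) with hc
  have hcov : coversOf selections = covers := rfl
  rw [hcov]
  by_cases hlen : covers.length ≤ 1
  · rw [if_pos hlen]
    interval_cases h : covers.length
    · rw [List.length_eq_zero_iff.mp h]; rfl
    · obtain ⟨a, ha⟩ := List.length_eq_one_iff.mp h
      rw [ha]; rfl
  · rw [if_neg hlen, PySem.List.slice_to_neg_one]
    rfl
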